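-- pv_equiv track=rewrite | github.com/argriffing/xgcode | 20110331a.py | is_sign_harmonic
-- ===== SOURCE A (Python) =====
-- def get_leaf_set(id_to_adj):
--     return set(v for v, d in id_to_adj.items() if len(d) == 1)
--
-- def is_sign_harmonic(id_to_adj, id_to_val):
--     """
--     Sign harmonic will mean that each strong sign graph has a leaf.
--     Assume all values are either +1 or -1.
--     @param id_to_adj: maps an id to a list of adjacent ids
--     @param id_to_val: maps an id to a value
--     """
--     leaves = get_leaf_set(id_to_adj)
--     visited = set(leaves)
--     shell = set(leaves)
--     while shell:
--         next_shell = set()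
--         for v in shell:
--             v_val = id_to_val[v]
--             for u in id_to_adj[v]:
--                 u_val = id_to_val[u]
--                 if u_val == v_val and u not in visited:
--                     visited.add(u)
--                     next_shell.add(u)
--         shell = next_shell
--     nvertices = len(id_to_adj)
--     nvisited = len(visited)
--     return nvertices == nvisited
-- ===== SOURCE B (Python) =====
-- def is_sign_harmonic(id_to_adj, id_to_val):
--     """Bellman-Ford-style saturation instead of a BFS frontier: run
--     len(id_to_adj) global relaxation sweeps over every adjacency entry
--     (no shell/queue/stack, no visited-driven expansion); a sweep marks
--     every same-value neighbour of an already-marked vertex, and n sweeps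
--     reach the fixed point.  Finish with a plain subset test."""
--     reached = set(v for v, d in id_to_adj.items() if len(d) == 1)
--     for _ in range(len(id_to_adj)):
--         for v, d in id_to_adj.items():
--             if v in reached:
--                 v_val = id_to_val[v]
--                 for u in d:
--                     if id_to_val[u] == v_val:
--                         reached.add(u)
--     return set(id_to_adj) <= reached
-- ===== Notes on version B (the rewrite author's own statement) =====
-- stated objective: alternative
-- what changed: The leaf-seeded BFS frontier (shell/next_shell sets, expanding only from newly visited vertices, then a size comparison) is replaced by Bellman-Ford-style saturation: exactly len(id_to_adj) global relaxation sweeps over every adjacency entry with no frontier or worklist at all, followed by a plain subset test; n sweeps provably reach the same-sign reachability fixed point.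
-- outside the precondition, e.g. on is_sign_harmonic({1: [2]}, {1: 1, 2: -1}): A returns True, B returns True
import Mathlib
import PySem

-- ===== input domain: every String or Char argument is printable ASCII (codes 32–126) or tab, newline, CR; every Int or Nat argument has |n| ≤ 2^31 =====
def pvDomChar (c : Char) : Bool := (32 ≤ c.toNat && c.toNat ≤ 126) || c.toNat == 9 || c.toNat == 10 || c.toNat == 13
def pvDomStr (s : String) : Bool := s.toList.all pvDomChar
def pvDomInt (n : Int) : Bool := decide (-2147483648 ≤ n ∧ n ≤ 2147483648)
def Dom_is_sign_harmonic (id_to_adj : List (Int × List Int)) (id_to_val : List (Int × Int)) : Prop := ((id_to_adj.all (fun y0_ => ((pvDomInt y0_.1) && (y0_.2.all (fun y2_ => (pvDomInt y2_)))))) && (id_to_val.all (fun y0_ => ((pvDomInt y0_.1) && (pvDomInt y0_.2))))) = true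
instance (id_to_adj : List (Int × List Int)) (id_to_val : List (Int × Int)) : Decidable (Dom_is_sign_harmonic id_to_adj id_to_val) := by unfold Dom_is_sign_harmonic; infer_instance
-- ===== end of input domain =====

-- ===== PORT A =====
-- B replaces A's leaf-seeded BFS frontier by a fixed number of global relaxation
-- sweeps (no frontier/worklist); return values proved equal on Pre_.
def get_leaf_set (id_to_adj : List (Int × List Int)) : PySem.Set Int :=
  PySem.Set.ofList (((PySem.Dict.mk id_to_adj).items.filter (fun p => p.2.length == 1)).map (fun p => p.1))

-- one pass of A's while-loop body: folds over the shell, then over the adjacency list,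
-- growing (visited, next_shell).  id_to_val[v] / id_to_adj[v] would raise KeyError on a
-- missing key; Pre_ excludes that, the port reads a default there.
def pvBfsStep (id_to_adj : List (Int × List Int)) (id_to_val : List (Int × Int))
    (st0 : PySem.Set Int × PySem.Set Int) (shell : PySem.Set Int) :
    PySem.Set Int × PySem.Set Int :=
  shell.foldl (fun st v =>
    let v_val := PySem.Dict.getD (PySem.Dict.mk id_to_val) v 0
    (PySem.Dict.getD (PySem.Dict.mk id_to_adj) v []).foldl (fun st2 u =>
      let u_val := PySem.Dict.getD (PySem.Dict.mk id_to_val) u 0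
      if u_val == v_val && !(PySem.Set.contains st2.1 u)
      then (PySem.Set.add st2.1 u, PySem.Set.add st2.2 u)
      else st2) st) st0

-- 'while shell:' as fuel recursion; fuel = len(id_to_adj) + 2 suffices under Pre_
def pvBfsLoop (id_to_adj : List (Int × List Int)) (id_to_val : List (Int × Int)) :
    Nat → PySem.Set Int → PySem.Set Int → PySem.Set Int
  | 0, visited, _ => visited
  | fuel + 1, visited, shell =>
    if shell.isEmpty then visited
    else
      let st := pvBfsStep id_to_adj id_to_val (visited, PySem.Set.empty) shell
      pvBfsLoop id_to_adj id_to_val fuel st.1 st.2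

def is_sign_harmonic (id_to_adj : List (Int × List Int)) (id_to_val : List (Int × Int)) : Bool :=
  let leaves := get_leaf_set id_to_adj
  let visited := pvBfsLoop id_to_adj id_to_val (id_to_adj.length + 2) leaves leaves
  (((PySem.Dict.mk id_to_adj).size : Int) == PySem.Set.len visited)

-- ===== PORT B =====
-- inner 'for u in d: if id_to_val[u] == v_val: reached.add(u)'
def pvMark (id_to_val : List (Int × Int)) (v_val : Int) (R : PySem.Set Int) (u : Int) :
    PySem.Set Int :=
  if PySem.Dict.getD (PySem.Dict.mk id_to_val) u 0 == v_val then PySem.Set.add R u else R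

-- body of one sweep for one entry (v, d): 'if v in reached: ...'
def pvVisit (id_to_val : List (Int × Int)) (R : PySem.Set Int) (p : Int × List Int) :
    PySem.Set Int :=
  if PySem.Set.contains R p.1 then
    p.2.foldl (pvMark id_to_val (PySem.Dict.getD (PySem.Dict.mk id_to_val) p.1 0)) R
  else R

-- one global sweep 'for v, d in id_to_adj.items():'
def pvSweep (id_to_adj : List (Int × List Int)) (id_to_val : List (Int × Int))
    (R : PySem.Set Int) : PySem.Set Int :=
  (PySem.Dict.mk id_to_adj).items.foldl (pvVisit id_to_val) R

-- 'for _ in range(len(id_to_adj)):' — a counted loop, run len(id_to_adj) times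
def pvSat (id_to_adj : List (Int × List Int)) (id_to_val : List (Int × Int)) :
    Nat → PySem.Set Int → PySem.Set Int
  | 0, R => R
  | k + 1, R => pvSat id_to_adj id_to_val k (pvSweep id_to_adj id_to_val R)

def is_sign_harmonic_alt (id_to_adj : List (Int × List Int)) (id_to_val : List (Int × Int)) : Bool :=
  let reached0 := PySem.Set.ofList (((PySem.Dict.mk id_to_adj).items.filter
    (fun p => p.2.length == 1)).map (fun p => p.1))
  let reached := pvSat id_to_adj id_to_val id_to_adj.length reached0
  PySem.Set.issubset (PySem.Set.ofList (PySem.Dict.mk id_to_adj).keys) reached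

-- ===== PRECONDITION & SPEC =====
-- Pre_ excludes inputs on which A raises KeyError: both arguments must be genuine dicts
-- (distinct keys), and -- unless no vertex is a leaf, in which case A's loop never looks
-- anything up -- every vertex must have a value and every neighbour a value and an
-- adjacency entry.  This slightly over-excludes: a dict entry missing only for a vertex the
-- BFS never visits also makes A return normally (see claim.json cites).
def Pre_is_sign_harmonic (id_to_adj : List (Int × List Int)) (id_to_val : List (Int × Int)) : Prop :=
  (id_to_adj.map (fun p => p.1)).Nodup ∧ (id_to_val.map (fun p => p.1)).Nodup ∧
  ((∀ p ∈ id_to_adj, p.2.length ≠ 1) ∨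
    ((∀ p ∈ id_to_adj, p.1 ∈ id_to_val.map (fun q => q.1)) ∧
     (∀ p ∈ id_to_adj, ∀ u ∈ p.2,
       u ∈ id_to_adj.map (fun q => q.1) ∧ u ∈ id_to_val.map (fun q => q.1))))
instance (id_to_adj : List (Int × List Int)) (id_to_val : List (Int × Int)) : Decidable (Pre_is_sign_harmonic id_to_adj id_to_val) := by unfold Pre_is_sign_harmonic; infer_instance
def pvWitness_is_sign_harmonic : (List (Int × List Int)) × (List (Int × Int)) :=
  ([(1, [2]), (2, [1])], [(1, 1), (2, 1)])
def Spec_is_sign_harmonic (id_to_adj : List (Int × List Int)) (id_to_val : List (Int × Int)) (out : Bool) : Prop := out = is_sign_harmonic_alt id_to_adj id_to_val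
instance (id_to_adj : List (Int × List Int)) (id_to_val : List (Int × Int)) (out : Bool) : Decidable (Spec_is_sign_harmonic id_to_adj id_to_val out) := by unfold Spec_is_sign_harmonic; infer_instance

-- ===== CLAIM (what is proved, stated in full; the proofs are below) =====
def Claim_equal_is_sign_harmonic : Prop := ∀ (id_to_adj : List (Int × List Int)) (id_to_val : List (Int × Int)), Dom_is_sign_harmonic id_to_adj id_to_val → Pre_is_sign_harmonic id_to_adj id_to_val → Spec_is_sign_harmonic id_to_adj id_to_val (is_sign_harmonic id_to_adj id_to_val)

-- ===== LEMMAS AND PROOFS =====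

-- total lookup functions; definitionally the ports' inline dict lookups
abbrev pvAdj (id_to_adj : List (Int × List Int)) (v : Int) : List Int :=
  PySem.Dict.getD (PySem.Dict.mk id_to_adj) v []
abbrev pvVal (id_to_val : List (Int × Int)) (v : Int) : Int :=
  PySem.Dict.getD (PySem.Dict.mk id_to_val) v 0

-- a same-value directed edge, and "some vertex of S has an edge to x"
def pvEdge (a : List (Int × List Int)) (b : List (Int × Int)) (v u : Int) : Prop :=
  u ∈ pvAdj a v ∧ pvVal b u = pvVal b v
def pvE (a : List (Int × List Int)) (b : List (Int × Int)) (S : List Int) (x : Int) : Prop :=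
  ∃ v ∈ S, pvEdge a b v x

-- reachability from a seed list along same-value directed edges
inductive pvRF (a : List (Int × List Int)) (b : List (Int × Int)) (S : List Int) : Int → Prop
  | base (v : Int) : v ∈ S → pvRF a b S v
  | step (v u : Int) : pvRF a b S v → pvEdge a b v u → pvRF a b S u

theorem pvRF_lift {a : List (Int × List Int)} {b : List (Int × Int)} {S T : List Int}
    (h : ∀ y ∈ T, pvRF a b S y) {x : Int} (hx : pvRF a b T x) : pvRF a b S x := by
  induction hx with
  | base v hv => exact h v hv
  | step v u _ he ih => exact pvRF.step v u ih he

-- every neighbour returned by a lookup is a listed neighbour of some entry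
theorem pvAdj_mem {a : List (Int × List Int)} {v x : Int} (hx : x ∈ pvAdj a v) :
    ∃ p ∈ a, x ∈ p.2 := by
  unfold pvAdj PySem.Dict.getD PySem.Dict.get? at hx
  cases h : List.find? (fun p => p.1 == v) (PySem.Dict.mk a).items with
  | none => rw [h] at hx; simp at hx
  | some p =>
    rw [h] at hx; simp at hx
    exact ⟨p, List.mem_of_find?_eq_some h, hx⟩

-- with distinct keys, find? of a listed key returns its entry
theorem pvFind_of_mem : ∀ (a : List (Int × List Int)), (a.map (fun p => p.1)).Nodup →
    ∀ p ∈ a, List.find? (fun q => q.1 == p.1) a = some p := by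
  intro a
  induction a with
  | nil => intro _ p hp; cases hp
  | cons q t ih =>
    intro hKnd p hp
    rw [List.map_cons, List.nodup_cons] at hKnd
    rcases List.mem_cons.mp hp with rfl | hpt
    · simp
    · have hne : (q.1 == p.1) = false := by
        simp only [beq_eq_false_iff_ne, ne_eq]
        intro hq
        exact hKnd.1 (hq ▸ List.mem_map.mpr ⟨p, hpt, rfl⟩)
      have hstep : List.find? (fun q => q.1 == p.1) (q :: t) =
          List.find? (fun q => q.1 == p.1) t := by
        simp [hne]
      rw [hstep]
      exact ih hKnd.2 p hpt

-- with distinct keys, the lookup of a listed key returns its listed adjacency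
theorem pvAdj_of_mem {a : List (Int × List Int)} (hKnd : (a.map (fun p => p.1)).Nodup)
    {p : Int × List Int} (hp : p ∈ a) : pvAdj a p.1 = p.2 := by
  show PySem.Dict.getD (PySem.Dict.mk a) p.1 [] = p.2
  unfold PySem.Dict.getD PySem.Dict.get?
  rw [show (PySem.Dict.mk a).items = a from rfl, pvFind_of_mem a hKnd p hp]
  simp

-- characterisation of A's inner neighbour loop
theorem pvInnerA_char (b' : List (Int × Int)) (v : Int) (l : List Int) :
    ∀ st : PySem.Set Int × PySem.Set Int,
    (∀ x ∈ st.2, x ∈ st.1) → st.1.Nodup →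
    (∀ x, x ∈ (l.foldl (fun st2 u =>
        if pvVal b' u == pvVal b' v && !(PySem.Set.contains st2.1 u)
        then (PySem.Set.add st2.1 u, PySem.Set.add st2.2 u) else st2) st).1 ↔
      x ∈ st.1 ∨ (x ∈ l ∧ pvVal b' x = pvVal b' v)) ∧
    (∀ x, x ∈ (l.foldl (fun st2 u =>
        if pvVal b' u == pvVal b' v && !(PySem.Set.contains st2.1 u)
        then (PySem.Set.add st2.1 u, PySem.Set.add st2.2 u) else st2) st).2 ↔
      x ∈ st.2 ∨ (x ∈ l ∧ pvVal b' x = pvVal b' v ∧ x ∉ st.1)) ∧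
    (∀ x ∈ (l.foldl (fun st2 u =>
        if pvVal b' u == pvVal b' v && !(PySem.Set.contains st2.1 u)
        then (PySem.Set.add st2.1 u, PySem.Set.add st2.2 u) else st2) st).2,
      x ∈ (l.foldl (fun st2 u =>
        if pvVal b' u == pvVal b' v && !(PySem.Set.contains st2.1 u)
        then (PySem.Set.add st2.1 u, PySem.Set.add st2.2 u) else st2) st).1) ∧
    (l.foldl (fun st2 u =>
        if pvVal b' u == pvVal b' v && !(PySem.Set.contains st2.1 u)
        then (PySem.Set.add st2.1 u, PySem.Set.add st2.2 u) else st2) st).1.Nodup := by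
  induction l with
  | nil => intro st h2 hnd; exact ⟨fun x => by simp, fun x => by simp, h2, hnd⟩
  | cons u t ih =>
    intro st h2 hnd
    simp only [List.foldl_cons]
    by_cases hval : pvVal b' u = pvVal b' v
    · by_cases hu : u ∈ st.1
      · have hc : PySem.Set.contains st.1 u = true := (PySem.Set.contains_iff _ _).mpr hu
        rw [if_neg (by simp; exact fun _ => hu)]
        obtain ⟨m1, m2, s2, nd⟩ := ih st h2 hnd
        refine ⟨fun x => ?_, fun x => ?_, s2, nd⟩
        · rw [m1]; constructor
          · rintro (h | ⟨ht, hv⟩); exact Or.inl h; exact Or.inr ⟨List.mem_cons_of_mem _ ht, hv⟩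
          · rintro (h | ⟨hm, hv⟩); exact Or.inl h
            rcases List.mem_cons.mp hm with rfl | ht
            · exact Or.inl hu
            · exact Or.inr ⟨ht, hv⟩
        · rw [m2]; constructor
          · rintro (h | ⟨ht, hv, hn⟩); exact Or.inl h; exact Or.inr ⟨List.mem_cons_of_mem _ ht, hv, hn⟩
          · rintro (h | ⟨hm, hv, hn⟩); exact Or.inl h
            rcases List.mem_cons.mp hm with rfl | ht
            · exact absurd hu hn
            · exact Or.inr ⟨ht, hv, hn⟩
      · have hc : PySem.Set.contains st.1 u = false := by
          rw [← Bool.not_eq_true]; intro h; exact hu ((PySem.Set.contains_iff _ _).mp h)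
        rw [if_pos (by simp [hval]; exact hu)]
        have hnd' : (PySem.Set.add st.1 u).Nodup := PySem.Set.nodup_add _ _ hnd
        have h2' : ∀ x ∈ (PySem.Set.add st.1 u, PySem.Set.add st.2 u).2,
            x ∈ (PySem.Set.add st.1 u, PySem.Set.add st.2 u).1 := by
          intro x hx
          rcases (PySem.Set.mem_add _ _ _).mp hx with h | rfl
          · exact (PySem.Set.mem_add _ _ _).mpr (Or.inl (h2 x h))
          · exact (PySem.Set.mem_add _ _ _).mpr (Or.inr rfl)
        obtain ⟨m1, m2, s2, nd⟩ := ih (PySem.Set.add st.1 u, PySem.Set.add st.2 u) h2' hnd'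
        refine ⟨fun x => ?_, fun x => ?_, s2, nd⟩
        · rw [m1]; simp only [PySem.Set.mem_add]
          constructor
          · rintro ((h | rfl) | ⟨ht, hv⟩)
            · exact Or.inl h
            · exact Or.inr ⟨List.mem_cons_self, hval⟩
            · exact Or.inr ⟨List.mem_cons_of_mem _ ht, hv⟩
          · rintro (h | ⟨hm, hv⟩); exact Or.inl (Or.inl h)
            rcases List.mem_cons.mp hm with rfl | ht
            · exact Or.inl (Or.inr rfl)
            · exact Or.inr ⟨ht, hv⟩
        · rw [m2]; simp only [PySem.Set.mem_add]
          constructor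
          · rintro ((h | rfl) | ⟨ht, hv, hn⟩)
            · exact Or.inl h
            · exact Or.inr ⟨List.mem_cons_self, hval, hu⟩
            · exact Or.inr ⟨List.mem_cons_of_mem _ ht, hv, fun hx => hn (Or.inl hx)⟩
          · rintro (h | ⟨hm, hv, hn⟩); exact Or.inl (Or.inl h)
            rcases List.mem_cons.mp hm with rfl | ht
            · exact Or.inl (Or.inr rfl)
            · by_cases hxu : x = u
              · exact Or.inl (Or.inr hxu)
              · exact Or.inr ⟨ht, hv, fun hx => by rcases hx with h | h; exacts [hn h, hxu h]⟩
    · rw [if_neg (by simp [hval])]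
      obtain ⟨m1, m2, s2, nd⟩ := ih st h2 hnd
      refine ⟨fun x => ?_, fun x => ?_, s2, nd⟩
      · rw [m1]; constructor
        · rintro (h | ⟨ht, hv⟩); exact Or.inl h; exact Or.inr ⟨List.mem_cons_of_mem _ ht, hv⟩
        · rintro (h | ⟨hm, hv⟩); exact Or.inl h
          rcases List.mem_cons.mp hm with rfl | ht
          · exact absurd hv hval
          · exact Or.inr ⟨ht, hv⟩
      · rw [m2]; constructor
        · rintro (h | ⟨ht, hv, hn⟩); exact Or.inl h; exact Or.inr ⟨List.mem_cons_of_mem _ ht, hv, hn⟩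
        · rintro (h | ⟨hm, hv, hn⟩); exact Or.inl h
          rcases List.mem_cons.mp hm with rfl | ht
          · exact absurd hv hval
          · exact Or.inr ⟨ht, hv, hn⟩

theorem pvE_cons {a : List (Int × List Int)} {b : List (Int × Int)} {v : Int} {t : List Int}
    {x : Int} : pvE a b (v :: t) x ↔ pvEdge a b v x ∨ pvE a b t x := by
  constructor
  · rintro ⟨w, hw, he⟩
    rcases List.mem_cons.mp hw with rfl | hw
    · exact Or.inl he
    · exact Or.inr ⟨w, hw, he⟩
  · rintro (he | ⟨w, hw, he⟩)
    · exact ⟨v, List.mem_cons_self, he⟩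
    · exact ⟨w, List.mem_cons_of_mem _ hw, he⟩

theorem pvE_RF {a : List (Int × List Int)} {b : List (Int × Int)} {S : List Int} {x : Int}
    (h : pvE a b S x) : pvRF a b S x := by
  obtain ⟨v, hv, he⟩ := h
  exact pvRF.step v x (pvRF.base v hv) he

-- a strict subset of nodup lists is strictly shorter
theorem pvLen_lt {l1 l2 : List Int} (h1 : l1.Nodup) (hsub : l1 ⊆ l2) {x : Int}
    (hx : x ∈ l2) (hnx : x ∉ l1) : l1.length + 1 ≤ l2.length := by
  have hnd : (x :: l1).Nodup := List.nodup_cons.mpr ⟨hnx, h1⟩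
  have : (x :: l1).Subperm l2 := hnd.subperm (by
    intro y hy
    rcases List.mem_cons.mp hy with rfl | hy
    exacts [hx, hsub hy])
  simpa using this.length_le

-- characterisation of A's whole shell pass
theorem pvStep_char (a : List (Int × List Int)) (b : List (Int × Int)) (s : List Int) :
    ∀ st : PySem.Set Int × PySem.Set Int,
    (∀ x ∈ st.2, x ∈ st.1) → st.1.Nodup →
    (∀ x, x ∈ (pvBfsStep a b st s).1 ↔ x ∈ st.1 ∨ pvE a b s x) ∧
    (∀ x, x ∈ (pvBfsStep a b st s).2 ↔ x ∈ st.2 ∨ (pvE a b s x ∧ x ∉ st.1)) ∧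
    (∀ x ∈ (pvBfsStep a b st s).2, x ∈ (pvBfsStep a b st s).1) ∧
    (pvBfsStep a b st s).1.Nodup := by
  induction s with
  | nil =>
    intro st h2 hnd
    exact ⟨fun x => by simp [pvBfsStep, pvE], fun x => by simp [pvBfsStep, pvE], h2, hnd⟩
  | cons v t ih =>
    intro st h2 hnd
    obtain ⟨m1, m2, s2, nd⟩ := pvInnerA_char b v (pvAdj a v) st h2 hnd
    set st' := (pvAdj a v).foldl (fun st2 u =>
        if pvVal b u == pvVal b v && !(PySem.Set.contains st2.1 u)
        then (PySem.Set.add st2.1 u, PySem.Set.add st2.2 u) else st2) st with hst'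
    have hstep : pvBfsStep a b st (v :: t) = pvBfsStep a b st' t := rfl
    obtain ⟨M1, M2, S2, ND⟩ := ih st' s2 nd
    rw [hstep]
    refine ⟨fun x => ?_, fun x => ?_, S2, ND⟩
    · rw [M1, m1, pvE_cons]
      constructor
      · rintro ((h | ⟨hm, hv⟩) | h)
        · exact Or.inl h
        · exact Or.inr (Or.inl ⟨hm, hv⟩)
        · exact Or.inr (Or.inr h)
      · rintro (h | (he | h))
        · exact Or.inl (Or.inl h)
        · exact Or.inl (Or.inr he)
        · exact Or.inr h
    · rw [M2, m2, pvE_cons]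
      constructor
      · rintro ((h | ⟨hm, hv, hn⟩) | ⟨h, hn⟩)
        · exact Or.inl h
        · exact Or.inr ⟨Or.inl ⟨hm, hv⟩, hn⟩
        · refine Or.inr ⟨Or.inr h, fun hx => hn ((m1 x).mpr (Or.inl hx))⟩
      · rintro (h | ⟨(he | h), hn⟩)
        · exact Or.inl (Or.inl h)
        · exact Or.inl (Or.inr ⟨he.1, he.2, hn⟩)
        · by_cases hx1 : x ∈ st'.1
          · rcases (m1 x).mp hx1 with h' | h'
            · exact absurd h' hn
            · exact Or.inl (Or.inr ⟨h'.1, h'.2, hn⟩)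
          · exact Or.inr ⟨h, hx1⟩

-- full characterisation of A's while-loop
theorem pvBfsLoop_char (a : List (Int × List Int)) (b : List (Int × Int))
    (hadjK : ∀ v x, x ∈ pvAdj a v → x ∈ a.map (fun p => p.1)) :
    ∀ fuel (vis shell : PySem.Set Int),
    (∀ x ∈ shell, x ∈ vis) → vis.Nodup → (∀ x ∈ vis, x ∈ a.map (fun p => p.1)) →
    (∀ v ∈ vis, v ∉ shell → ∀ u, pvEdge a b v u → u ∈ vis) →
    1 ≤ fuel → (shell ≠ [] → (a.map (fun p => p.1)).length + 2 ≤ fuel + vis.length) →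
    (∀ x ∈ vis, x ∈ pvBfsLoop a b fuel vis shell) ∧
    (∀ x ∈ pvBfsLoop a b fuel vis shell, x ∈ vis ∨ pvRF a b shell x) ∧
    (∀ v ∈ pvBfsLoop a b fuel vis shell, ∀ u, pvEdge a b v u → u ∈ pvBfsLoop a b fuel vis shell) ∧
    (∀ x ∈ pvBfsLoop a b fuel vis shell, x ∈ a.map (fun p => p.1)) ∧
    (pvBfsLoop a b fuel vis shell).Nodup := by
  intro fuel
  induction fuel with
  | zero => intro vis shell _ _ _ _ h1 _; omega
  | succ fuel ih =>
    intro vis shell hsub hnd hK hclosed h1 hfuel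
    by_cases hsh : shell = []
    · subst hsh
      have heq : pvBfsLoop a b (fuel + 1) vis [] = vis := by
        show (if ([] : List Int).isEmpty then vis else _) = vis
        simp
      rw [heq]
      exact ⟨fun x hx => hx, fun x hx => Or.inl hx,
        fun v hv u he => hclosed v hv (List.not_mem_nil) u he, hK, hnd⟩
    · have heq : pvBfsLoop a b (fuel + 1) vis shell =
          pvBfsLoop a b fuel (pvBfsStep a b (vis, PySem.Set.empty) shell).1
            (pvBfsStep a b (vis, PySem.Set.empty) shell).2 := by
        show (if shell.isEmpty then vis else _) = _
        rw [if_neg (by simpa using hsh)]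
      obtain ⟨m1, m2, s2, nd⟩ := pvStep_char a b shell (vis, PySem.Set.empty)
        (by intro x hx; cases hx) hnd
      set st := pvBfsStep a b (vis, PySem.Set.empty) shell with hst
      have hmono : ∀ x ∈ vis, x ∈ st.1 := fun x hx => (m1 x).mpr (Or.inl hx)
      have hsh2 : ∀ x ∈ st.2, pvE a b shell x ∧ x ∉ vis := by
        intro x hx
        rcases (m2 x).mp hx with h | h
        · cases h
        · exact h
      have hK' : ∀ x ∈ st.1, x ∈ a.map (fun p => p.1) := by
        intro x hx
        rcases (m1 x).mp hx with h | ⟨v, _, he⟩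
        exacts [hK x h, hadjK v x he.1]
      have hclosed' : ∀ w ∈ st.1, w ∉ st.2 → ∀ u, pvEdge a b w u → u ∈ st.1 := by
        intro w hw hwn u he
        by_cases hwvis : w ∈ vis
        · by_cases hwsh : w ∈ shell
          · exact (m1 u).mpr (Or.inr ⟨w, hwsh, he⟩)
          · exact hmono u (hclosed w hwvis hwsh u he)
        · rcases (m1 w).mp hw with h | h
          · exact absurd h hwvis
          · exact absurd ((m2 w).mpr (Or.inr ⟨h, hwvis⟩)) hwn
      have hlenvis : vis.length ≤ (a.map (fun p => p.1)).length :=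
        (hnd.subperm hK).length_le
      have h1' : 1 ≤ fuel := by have := hfuel hsh; omega
      have hfuel' : st.2 ≠ [] → (a.map (fun p => p.1)).length + 2 ≤ fuel + st.1.length := by
        intro hne
        obtain ⟨x, hx⟩ := List.exists_mem_of_ne_nil _ hne
        obtain ⟨_, hxv⟩ := hsh2 x hx
        have := pvLen_lt hnd hmono (s2 x hx) hxv
        have := hfuel hsh
        omega
      obtain ⟨M1, M2, M3, M4, M5⟩ := ih st.1 st.2 s2 nd hK' hclosed' h1' hfuel'
      rw [heq]
      refine ⟨fun x hx => M1 x (hmono x hx), fun x hx => ?_, M3, M4, M5⟩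
      rcases M2 x hx with h | h
      · rcases (m1 x).mp h with h' | h'
        · exact Or.inl h'
        · exact Or.inr (pvE_RF h')
      · exact Or.inr (pvRF_lift (fun y hy => pvE_RF (hsh2 y hy).1) h)

-- ---- B-side lemmas: relaxation sweeps ----

-- the inner mark loop only appends, keeps Nodup, and its members are characterised
theorem pvMark_append (b : List (Int × Int)) (w : Int) (d : List Int) :
    ∀ R : PySem.Set Int, ∃ t, d.foldl (pvMark b w) R = R ++ t := by
  induction d with
  | nil => intro R; exact ⟨[], (List.append_nil R).symm⟩
  | cons u t ih =>
    intro R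
    rw [List.foldl_cons]
    by_cases h : pvVal b u = w
    · have hhead : pvMark b w R u = if u ∈ R then R else R ++ [u] := by
        unfold pvMark
        rw [if_pos (by simpa using h)]
        exact PySem.Set.add_eq_ite R u
      rw [hhead]
      by_cases hm : u ∈ R
      · rw [if_pos hm]; exact ih R
      · rw [if_neg hm]
        obtain ⟨t1, ht1⟩ := ih (R ++ [u])
        exact ⟨u :: t1, by rw [ht1, List.append_assoc]; rfl⟩
    · have hhead : pvMark b w R u = R := by
        unfold pvMark; rw [if_neg (by simpa using h)]
      rw [hhead]; exact ih R

theorem pvMark_nodup (b : List (Int × Int)) (w : Int) (d : List Int) :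
    ∀ R : PySem.Set Int, R.Nodup → (d.foldl (pvMark b w) R).Nodup := by
  induction d with
  | nil => intro R h; exact h
  | cons u t ih =>
    intro R h
    rw [List.foldl_cons]
    by_cases hv : pvVal b u = w
    · have hhead : pvMark b w R u = PySem.Set.add R u := by
        unfold pvMark; rw [if_pos (by simpa using hv)]
      rw [hhead]; exact ih _ (PySem.Set.nodup_add _ _ h)
    · have hhead : pvMark b w R u = R := by
        unfold pvMark; rw [if_neg (by simpa using hv)]
      rw [hhead]; exact ih _ h

theorem pvMark_mem (b : List (Int × Int)) (w : Int) (d : List Int) :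
    ∀ (R : PySem.Set Int) (x : Int),
    x ∈ d.foldl (pvMark b w) R ↔ x ∈ R ∨ (x ∈ d ∧ pvVal b x = w) := by
  induction d with
  | nil => intro R x; simp
  | cons u t ih =>
    intro R x
    rw [List.foldl_cons]
    by_cases hv : pvVal b u = w
    · have hhead : pvMark b w R u = PySem.Set.add R u := by
        unfold pvMark; rw [if_pos (by simpa using hv)]
      rw [hhead, ih, PySem.Set.mem_add]
      constructor
      · rintro ((h | rfl) | ⟨ht, hx⟩)
        · exact Or.inl h
        · exact Or.inr ⟨List.mem_cons_self, hv⟩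
        · exact Or.inr ⟨List.mem_cons_of_mem _ ht, hx⟩
      · rintro (h | ⟨hm, hx⟩); exact Or.inl (Or.inl h)
        rcases List.mem_cons.mp hm with rfl | ht
        · exact Or.inl (Or.inr rfl)
        · exact Or.inr ⟨ht, hx⟩
    · have hhead : pvMark b w R u = R := by
        unfold pvMark; rw [if_neg (by simpa using hv)]
      rw [hhead, ih]
      constructor
      · rintro (h | ⟨ht, hx⟩); exact Or.inl h; exact Or.inr ⟨List.mem_cons_of_mem _ ht, hx⟩
      · rintro (h | ⟨hm, hx⟩); exact Or.inl h
        rcases List.mem_cons.mp hm with rfl | ht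
        · exact absurd hx hv
        · exact Or.inr ⟨ht, hx⟩

-- the closed form of the inner loop when every candidate is already in R
theorem pvMark_eq_of_closed (b : List (Int × Int)) (w : Int) (d : List Int)
    (R : PySem.Set Int) (h : ∀ u ∈ d, pvVal b u = w → u ∈ R) :
    d.foldl (pvMark b w) R = R := by
  induction d with
  | nil => rfl
  | cons u t ih =>
    rw [List.foldl_cons]
    have hbody : pvMark b w R u = R := by
      unfold pvMark
      split_ifs with hv
      · exact PySem.Set.add_of_mem (h u List.mem_cons_self (by simpa using hv))
      · rfl
    rw [hbody]
    exact ih (fun u hu hv => h u (List.mem_cons_of_mem _ hu) hv)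

-- one sweep over a list of entries only appends
theorem pvVisit_append (b : List (Int × Int)) (l : List (Int × List Int)) :
    ∀ R : PySem.Set Int, ∃ t, l.foldl (pvVisit b) R = R ++ t := by
  induction l with
  | nil => intro R; exact ⟨[], (List.append_nil R).symm⟩
  | cons p l ih =>
    intro R
    rw [List.foldl_cons]
    obtain ⟨t1, ht1⟩ : ∃ t1, pvVisit b R p = R ++ t1 := by
      unfold pvVisit
      split_ifs with h
      · exact pvMark_append b _ p.2 R
      · exact ⟨[], (List.append_nil R).symm⟩
    obtain ⟨t2, ht2⟩ := ih (pvVisit b R p)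
    exact ⟨t1 ++ t2, by rw [ht2, ht1, List.append_assoc]⟩

theorem pvVisit_mono (b : List (Int × Int)) (l : List (Int × List Int))
    (R : PySem.Set Int) : ∀ x ∈ R, x ∈ l.foldl (pvVisit b) R := by
  intro x hx
  obtain ⟨t, ht⟩ := pvVisit_append b l R
  rw [ht]
  exact List.mem_append_left _ hx

theorem pvVisit_nodup (b : List (Int × Int)) (l : List (Int × List Int)) :
    ∀ R : PySem.Set Int, R.Nodup → (l.foldl (pvVisit b) R).Nodup := by
  induction l with
  | nil => intro R h; exact h
  | cons p l ih =>
    intro R h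
    rw [List.foldl_cons]
    refine ih _ ?_
    unfold pvVisit
    split_ifs with hc
    · exact pvMark_nodup b _ p.2 R h
    · exact h

-- every element of a sweep was in R or is a listed neighbour
theorem pvVisit_bound (b : List (Int × Int)) (l : List (Int × List Int)) :
    ∀ (R : PySem.Set Int) (x : Int), x ∈ l.foldl (pvVisit b) R →
      x ∈ R ∨ ∃ p ∈ l, x ∈ p.2 := by
  induction l with
  | nil => intro R x hx; exact Or.inl hx
  | cons p l ih =>
    intro R x hx
    rw [List.foldl_cons] at hx
    rcases ih _ x hx with h | ⟨q, hq, hxq⟩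
    · unfold pvVisit at h
      split_ifs at h with hc
      · rcases (pvMark_mem b _ p.2 R x).mp h with h' | ⟨h', _⟩
        · exact Or.inl h'
        · exact Or.inr ⟨p, List.mem_cons_self, h'⟩
      · exact Or.inl h
    · exact Or.inr ⟨q, List.mem_cons_of_mem _ hq, hxq⟩

-- soundness: a sweep over genuine entries of a adds only pvRF-reachable vertices
theorem pvVisit_sound (a : List (Int × List Int)) (b : List (Int × Int)) (L : List Int)
    (l : List (Int × List Int)) (hl : ∀ p ∈ l, pvAdj a p.1 = p.2) :
    ∀ R : PySem.Set Int, (∀ x ∈ R, pvRF a b L x) →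
      ∀ x ∈ l.foldl (pvVisit b) R, pvRF a b L x := by
  induction l with
  | nil => intro R h x hx; exact h x hx
  | cons p l ih =>
    intro R h x hx
    rw [List.foldl_cons] at hx
    refine ih (fun q hq => hl q (List.mem_cons_of_mem _ hq)) _ ?_ x hx
    intro y hy
    unfold pvVisit at hy
    split_ifs at hy with hc
    · rcases (pvMark_mem b _ p.2 R y).mp hy with h' | ⟨h', hv⟩
      · exact h y h'
      · have hp1 : pvRF a b L p.1 := h p.1 ((PySem.Set.contains_iff _ _).mp hc)
        exact pvRF.step p.1 y hp1 ⟨(hl p List.mem_cons_self) ▸ h', hv⟩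
    · exact h y hy

-- one-step progress: a sweep marks every same-value neighbour of a marked entry
theorem pvVisit_step (b : List (Int × Int)) (l : List (Int × List Int)) :
    ∀ (R : PySem.Set Int) (p : Int × List Int) (u : Int), p ∈ l → p.1 ∈ R →
      u ∈ p.2 → pvVal b u = pvVal b p.1 → u ∈ l.foldl (pvVisit b) R := by
  induction l with
  | nil => intro R p u hp; cases hp
  | cons q l ih =>
    intro R p u hp hpR hu hv
    rw [List.foldl_cons]
    rcases List.mem_cons.mp hp with rfl | hpl
    · refine pvVisit_mono b l _ u ?_
      unfold pvVisit
      rw [if_pos ((PySem.Set.contains_iff _ _).mpr hpR)]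
      exact (pvMark_mem b _ p.2 R u).mpr (Or.inr ⟨hu, hv⟩)
    · refine ih _ p u hpl ?_ hu hv
      obtain ⟨t, ht⟩ : ∃ t, pvVisit b R q = R ++ t := by
        unfold pvVisit
        split_ifs with h
        · exact pvMark_append b _ q.2 R
        · exact ⟨[], (List.append_nil R).symm⟩
      rw [ht]
      exact List.mem_append_left _ hpR

-- a sweep over an R closed under listed same-value edges is the identity
theorem pvVisit_eq_of_closed (b : List (Int × Int)) (l : List (Int × List Int))
    (R : PySem.Set Int)
    (h : ∀ p ∈ l, p.1 ∈ R → ∀ u ∈ p.2, pvVal b u = pvVal b p.1 → u ∈ R) :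
    l.foldl (pvVisit b) R = R := by
  induction l with
  | nil => rfl
  | cons p l ih =>
    rw [List.foldl_cons]
    have hbody : pvVisit b R p = R := by
      unfold pvVisit
      split_ifs with hc
      · exact pvMark_eq_of_closed b _ p.2 R
          (fun u hu hv => h p List.mem_cons_self ((PySem.Set.contains_iff _ _).mp hc) u hu hv)
      · rfl
    rw [hbody]
    exact ih (fun q hq => h q (List.mem_cons_of_mem _ hq))

-- pvSat: monotone, and a fixed point stays put
theorem pvSat_mono (a : List (Int × List Int)) (b : List (Int × Int)) :
    ∀ (k : Nat) (R : PySem.Set Int), ∀ x ∈ R, x ∈ pvSat a b k R := by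
  intro k
  induction k with
  | zero => intro R x hx; exact hx
  | succ k ih =>
    intro R x hx
    exact ih _ x (pvVisit_mono b _ R x hx)

theorem pvSat_of_fix (a : List (Int × List Int)) (b : List (Int × Int)) :
    ∀ (k : Nat) (R : PySem.Set Int), pvSweep a b R = R → pvSat a b k R = R := by
  intro k
  induction k with
  | zero => intro R _; rfl
  | succ k ih =>
    intro R h
    show pvSat a b k (pvSweep a b R) = R
    rw [h]; exact ih R h

-- after a.length sweeps the result is a fixed point of the sweep (cardinality fuel)
theorem pvSat_fix (a : List (Int × List Int)) (b : List (Int × Int))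
    (hnb : ∀ p ∈ a, ∀ u ∈ p.2, u ∈ a.map (fun q => q.1)) :
    ∀ (k : Nat) (R : PySem.Set Int), R.Nodup → (∀ x ∈ R, x ∈ a.map (fun p => p.1)) →
      (a.map (fun p => p.1)).length ≤ k + R.length →
      pvSweep a b (pvSat a b k R) = pvSat a b k R := by
  intro k
  induction k with
  | zero =>
    intro R hnd hK hlen
    show pvSweep a b R = R
    have hperm : R.Perm (a.map (fun p => p.1)) :=
      (hnd.subperm hK).perm_of_length_le (by simpa using hlen)
    refine pvVisit_eq_of_closed b _ R ?_
    intro p hp _ u hu _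
    exact hperm.symm.subset (hnb p hp u hu)
  | succ k ih =>
    intro R hnd hK hlen
    by_cases hfix : pvSweep a b R = R
    · have hsat : pvSat a b (k + 1) R = R := pvSat_of_fix a b (k + 1) R hfix
      rw [hsat, hfix]
    · show pvSweep a b (pvSat a b k (pvSweep a b R)) = pvSat a b k (pvSweep a b R)
      obtain ⟨t, ht⟩ := pvVisit_append b (PySem.Dict.mk a).items R
      have htne : t ≠ [] := by
        intro h0
        exact hfix (by unfold pvSweep; rw [ht, h0, List.append_nil])
      have hlen1 : R.length + 1 ≤ (pvSweep a b R).length := by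
        unfold pvSweep
        rw [ht, List.length_append]
        have : 1 ≤ t.length := List.length_pos_of_ne_nil htne
        omega
      refine ih (pvSweep a b R) (pvVisit_nodup b _ R hnd) ?_ (by omega)
      intro x hx
      rcases pvVisit_bound b _ R x hx with h | ⟨p, hp, hxp⟩
      · exact hK x h
      · exact hnb p hp x hxp

-- a sweep from the empty set is empty (no-leaf case)
theorem pvVisit_empty (b : List (Int × Int)) (l : List (Int × List Int)) :
    l.foldl (pvVisit b) ([] : PySem.Set Int) = [] := by
  induction l with
  | nil => rfl
  | cons p l ih =>
    rw [List.foldl_cons]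
    have hbody : pvVisit b [] p = [] := by
      unfold pvVisit
      rw [if_neg (by simp)]
    rw [hbody]; exact ih

-- any property preserved by one sweep is preserved by pvSat
theorem pvSat_pres (a : List (Int × List Int)) (b : List (Int × Int))
    (P : PySem.Set Int → Prop) (hP : ∀ R, P R → P (pvSweep a b R)) :
    ∀ (k : Nat) (R : PySem.Set Int), P R → P (pvSat a b k R) := by
  intro k
  induction k with
  | zero => intro R h; exact h
  | succ k ih => intro R h; exact ih _ (hP R h)

-- assembling the equivalence
theorem pvMain (a : List (Int × List Int)) (b : List (Int × Int))
    (hpre : Pre_is_sign_harmonic a b) :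
    is_sign_harmonic a b = is_sign_harmonic_alt a b := by
  obtain ⟨hKnd, hVnd, hcond⟩ := hpre
  have hKlen : (a.map (fun p => p.1)).length = a.length := List.length_map _
  rcases hcond with hnoleaf | ⟨hkeyval, hnb⟩
  · -- no leaf entries: A's loop body never runs and B's reached set starts (and stays) empty
    have hfilt : List.filter (fun p => p.2.length == 1) a = [] :=
      List.filter_eq_nil_iff.mpr (fun p hp => by simpa using hnoleaf p hp)
    have hleaf : get_leaf_set a = ([] : List Int) := by
      unfold get_leaf_set
      rw [show (PySem.Dict.mk a).items = a from rfl, hfilt]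
      rfl
    rw [Bool.eq_iff_iff]
    unfold is_sign_harmonic is_sign_harmonic_alt
    dsimp only []
    rw [hleaf, hfilt]
    have hFA : pvBfsLoop a b (a.length + 2) ([] : PySem.Set Int) ([] : PySem.Set Int) = [] := by
      show (if ([] : List Int).isEmpty then _ else _) = _
      simp
    have hFB : pvSat a b a.length (PySem.Set.ofList
        (List.map (fun p => p.1) ([] : List (Int × List Int)))) = [] := by
      refine pvSat_of_fix a b a.length _ ?_
      exact pvVisit_empty b _
    rw [hFA, hFB]
    simp only [beq_iff_eq, PySem.Dict.size, PySem.Set.len]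
    rw [PySem.Set.issubset_iff]
    constructor
    · intro h x hx
      have h0 : a.length = 0 := by exact_mod_cast h
      have ha : a = [] := List.length_eq_zero_iff.mp h0
      subst ha
      simp [PySem.Dict.keys] at hx
    · intro h
      have ha : a = [] := by
        cases a with
        | nil => rfl
        | cons p t =>
          have hm : p.1 ∈ PySem.Set.ofList (PySem.Dict.mk (p :: t)).keys := by
            rw [PySem.Set.mem_ofList]
            simp [PySem.Dict.keys]
          exact absurd (h p.1 hm) (List.not_mem_nil)
      subst ha
      simp
  · have hadjK : ∀ v x, x ∈ pvAdj a v → x ∈ a.map (fun p => p.1) := by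
      intro v x hx
      obtain ⟨p, hp, hxp⟩ := pvAdj_mem hx
      exact (hnb p hp x hxp).1
    have hnb' : ∀ p ∈ a, ∀ u ∈ p.2, u ∈ a.map (fun q => q.1) :=
      fun p hp u hu => (hnb p hp u hu).1
    have hAdjEq : ∀ p ∈ a, pvAdj a p.1 = p.2 := fun p hp => pvAdj_of_mem hKnd hp
    set L := ((PySem.Dict.mk a).items.filter (fun p => p.2.length == 1)).map
      (fun p => p.1) with hLdef
    have hL0sub : L.Sublist (a.map (fun p => p.1)) := List.Sublist.map _ List.filter_sublist
    have hL0nd : L.Nodup := hKnd.sublist hL0sub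
    have hleaf : get_leaf_set a = L := by
      unfold get_leaf_set
      exact PySem.Set.ofList_eq_self_of_nodup _ hL0nd
    -- A's side: visited = everything pvRF-reachable from the leaves
    obtain ⟨A1, A2, A3, A4, A5⟩ := pvBfsLoop_char a b hadjK (a.length + 2) L L
      (fun x hx => hx) hL0nd (fun x hx => hL0sub.subset hx)
      (fun v hv hnv _ _ => absurd hv hnv) (by omega) (by intro _; omega)
    have charA : ∀ x, x ∈ pvBfsLoop a b (a.length + 2) L L ↔ pvRF a b L x := by
      intro x
      constructor
      · intro hx; rcases A2 x hx with h | h; exacts [pvRF.base x h, h]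
      · intro hr
        induction hr with
        | base v hv => exact A1 v hv
        | step v u hrv he ihv => exact A3 v ihv u he
    -- B's side: a.length sweeps reach the fixed point = the same reachable set
    set F := pvSat a b a.length L with hFdef
    have hfixp : pvSweep a b F = F := by
      rw [hFdef]
      exact pvSat_fix a b hnb' a.length L hL0nd (fun x hx => hL0sub.subset hx)
        (by omega)
    have hFnd : F.Nodup := by
      rw [hFdef]
      exact pvSat_pres a b (fun R => R.Nodup) (fun R h => pvVisit_nodup b _ R h)
        a.length L hL0nd
    have hFK : ∀ x ∈ F, x ∈ a.map (fun p => p.1) := by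
      rw [hFdef]
      refine pvSat_pres a b (fun R => ∀ x ∈ R, x ∈ a.map (fun p => p.1)) ?_
        a.length L (fun x hx => hL0sub.subset hx)
      intro R h x hx
      rcases pvVisit_bound b _ R x hx with h' | ⟨p, hp, hxp⟩
      · exact h x h'
      · exact hnb' p hp x hxp
    have hFsound : ∀ x ∈ F, pvRF a b L x := by
      rw [hFdef]
      refine pvSat_pres a b (fun R => ∀ x ∈ R, pvRF a b L x) ?_
        a.length L (fun x hx => pvRF.base x hx)
      intro R h
      exact pvVisit_sound a b L _ hAdjEq R h
    have hFclosed : ∀ v ∈ F, ∀ u, pvEdge a b v u → u ∈ F := by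
      intro v hv u he
      obtain ⟨hu, hval⟩ := he
      obtain ⟨p, hp, hpv⟩ := List.mem_map.mp (hFK v hv)
      subst hpv
      have hu2 : u ∈ p.2 := by rw [← hAdjEq p hp]; exact hu
      have hstep : u ∈ (PySem.Dict.mk a).items.foldl (pvVisit b) F :=
        pvVisit_step b _ F p u hp hv hu2 hval
      rwa [show (PySem.Dict.mk a).items.foldl (pvVisit b) F = pvSweep a b F from rfl,
        hfixp] at hstep
    have charB : ∀ x, x ∈ F ↔ pvRF a b L x := by
      intro x
      constructor
      · exact hFsound x
      · intro hr
        induction hr with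
        | base v hv => exact hFdef ▸ pvSat_mono a b a.length L v hv
        | step v u hrv he ihv => exact hFclosed v ihv u he
    have lhs_iff : is_sign_harmonic a b = true ↔
        a.length = (pvBfsLoop a b (a.length + 2) L L).length := by
      unfold is_sign_harmonic
      rw [hleaf]
      simp only [beq_iff_eq, PySem.Dict.size, PySem.Set.len]
      exact Int.natCast_inj
    have rhs_iff : is_sign_harmonic_alt a b = true ↔
        ∀ v ∈ a.map (fun p => p.1), v ∈ F := by
      show PySem.Set.issubset (PySem.Set.ofList (PySem.Dict.mk a).keys)
        (pvSat a b a.length (PySem.Set.ofList L)) = true ↔ _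
      rw [show PySem.Set.ofList L = L from PySem.Set.ofList_eq_self_of_nodup _ hL0nd]
      rw [show (PySem.Dict.mk a).keys = a.map (fun p => p.1) from rfl]
      rw [show PySem.Set.ofList (a.map (fun p => p.1)) = a.map (fun p => p.1) from
        PySem.Set.ofList_eq_self_of_nodup _ hKnd]
      rw [PySem.Set.issubset_iff]
    rw [Bool.eq_iff_iff, lhs_iff, rhs_iff]
    constructor
    · intro hlen v hv
      have hperm := (A5.subperm A4).perm_of_length_le (by omega)
      exact (charB v).mpr ((charA v).mp (hperm.symm.subset hv))
    · intro hall
      have hsub : ∀ v ∈ a.map (fun p => p.1), v ∈ pvBfsLoop a b (a.length + 2) L L :=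
        fun v hv => (charA v).mpr ((charB v).mp (hall v hv))
      have h1 := (hKnd.subperm hsub).length_le
      have h2 := (A5.subperm A4).length_le
      omega

-- ===== VERDICT (by name: the statement is the Claim_ definition above) =====
theorem is_sign_harmonic_spec : Claim_equal_is_sign_harmonic := by
  intro id_to_adj id_to_val _ hpre
  exact pvMain id_to_adj id_to_val hpre
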